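-- pv_equiv track=rewrite | github.com/ehdnd/SCCC | BOJ/etc/12919.py | find
-- ===== SOURCE A (Python) =====
-- def find(s, t):
--     if s == t:
--         return 1
--     if len(s) >= len(t):
--         return 0
--
--     if t[-1] == "A" and find(s, t[:-1]):
--         return 1
--     if t[0] == "B" and find(s, t[:0:-1]):
--         return 1
--
--     return 0
-- ===== SOURCE B (Python) =====
-- def find(s, t):
--     # Backward search from t, iteratively with an explicit stack instead of recursion.
--     stack = [t]
--     while stack:
--         u = stack.pop()
--         if u == s:
--             return 1
--         if len(u) <= len(s):
--             continue
--         if u[-1] == "A":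
--             stack.append(u[:-1])
--         if u[0] == "B":
--             stack.append(u[:0:-1])
--     return 0
-- ===== Notes on version B (the rewrite author's own statement) =====
-- stated objective: alternative
-- what changed: Replaces the two-branch recursion by an iterative backward search that threads the frontier through an explicit LIFO stack seeded with t.
import Mathlib
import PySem

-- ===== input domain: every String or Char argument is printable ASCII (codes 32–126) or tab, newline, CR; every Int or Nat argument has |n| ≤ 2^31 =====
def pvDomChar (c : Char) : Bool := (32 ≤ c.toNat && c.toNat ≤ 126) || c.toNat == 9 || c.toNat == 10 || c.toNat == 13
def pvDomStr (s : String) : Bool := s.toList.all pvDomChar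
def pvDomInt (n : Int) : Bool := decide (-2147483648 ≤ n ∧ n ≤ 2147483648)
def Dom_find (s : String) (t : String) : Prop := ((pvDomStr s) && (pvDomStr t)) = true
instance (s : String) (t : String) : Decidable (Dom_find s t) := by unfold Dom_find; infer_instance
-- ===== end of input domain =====

-- B replaces A's two-branch recursion by an iterative backward search over an explicit stack (alternative decomposition, same cost).


-- ===== PORT A =====
-- A's recursion on the char lists; t[:-1] is PySem.List.slice, t[:0:-1] (reversed t[1:]) is
-- ported by hand as (t.drop 1).reverse — exact whenever t is nonempty, which holds at that point.
def findL (s t : List Char) : Int :=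
  if s = t then 1
  else if t.length ≤ s.length then 0
  else if PySem.List.pyGet? t (-1) = some 'A' ∧ findL s (PySem.List.slice t none (some (-1))) ≠ 0 then 1
  else if PySem.List.pyGet? t 0 = some 'B' ∧ findL s ((t.drop 1).reverse) ≠ 0 then 1
  else 0
termination_by t.length
decreasing_by
  · simp only [PySem.List.slice_to_neg_one, List.length_dropLast]; omega
  · simp only [List.length_reverse, List.length_drop]; omega


def find (s : String) (t : String) : Int := findL s.toList t.toList

-- ===== PORT B =====
-- B's loop: pop the top string u; accept on u = s, prune on len, else push u[:-1] on 'A'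
-- and then u[:0:-1] on 'B' (so the 'B' child is on top, as Python's list-as-stack has it).
def measB (st : List (List Char)) : Nat := (st.map fun u => 3 ^ u.length).sum

def loopB (s : List Char) : List (List Char) → Int
  | [] => 0
  | u :: rest =>
    if u = s then 1
    else if u.length ≤ s.length then loopB s rest
    else
      let st1 := if PySem.List.pyGet? u (-1) = some 'A' then PySem.List.slice u none (some (-1)) :: rest else rest
      let st2 := if PySem.List.pyGet? u 0 = some 'B' then ((u.drop 1).reverse) :: st1 else st1
      loopB s st2
termination_by st => measB st
decreasing_by
  · simp only [measB, List.map_cons, List.sum_cons]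
    have : 0 < 3 ^ u.length := Nat.pow_pos (by omega)
    omega
  · have hu : 1 ≤ u.length := by omega
    have key : 2 * 3 ^ (u.length - 1) + 1 ≤ 3 ^ u.length := by
      have h3 : 3 ^ u.length = 3 * 3 ^ (u.length - 1) := by
        rw [← pow_succ']; congr 1; omega
      have h1 : 1 ≤ 3 ^ (u.length - 1) := Nat.one_le_pow _ _ (by omega)
      omega
    simp only [measB]
    split_ifs <;>
      simp only [PySem.List.slice_to_neg_one, List.map_cons, List.sum_cons,
        List.length_dropLast, List.length_reverse, List.length_drop] <;> omega

def find_alt (s : String) (t : String) : Int := loopB s.toList [t.toList]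

-- ===== PRECONDITION & SPEC =====
def Spec_find (s : String) (t : String) (out : Int) : Prop := out = find_alt s t
instance (s : String) (t : String) (out : Int) : Decidable (Spec_find s t out) := by unfold Spec_find; infer_instance

-- ===== CLAIM (what is proved, stated in full; the proofs are below) =====
def Claim_equal_find : Prop := ∀ (s : String) (t : String), Dom_find s t → Spec_find s t (find s t)

-- ===== LEMMAS AND PROOFS =====

lemma findL_self (s : List Char) : findL s s = 1 := by
  rw [findL]; simp

lemma findL_zero_or_one (s t : List Char) : findL s t = 0 ∨ findL s t = 1 := by
  rw [findL]; split_ifs <;> simp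

lemma findL_of_short (s t : List Char) (hne : s ≠ t) (hlen : t.length ≤ s.length) :
    findL s t = 0 := by
  rw [findL]; simp [hne, hlen]

lemma findL_one_iff (s t : List Char) (hne : s ≠ t) (hlen : s.length < t.length) :
    findL s t = 1 ↔
      (PySem.List.pyGet? t (-1) = some 'A' ∧ findL s (PySem.List.slice t none (some (-1))) = 1) ∨
      (PySem.List.pyGet? t 0 = some 'B' ∧ findL s ((t.drop 1).reverse) = 1) := by
  have e1 : (findL s (PySem.List.slice t none (some (-1))) ≠ 0) ↔
      (findL s (PySem.List.slice t none (some (-1))) = 1) := by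
    rcases findL_zero_or_one s (PySem.List.slice t none (some (-1))) with h | h <;> rw [h] <;> decide
  have e2 : (findL s ((t.drop 1).reverse) ≠ 0) ↔ (findL s ((t.drop 1).reverse) = 1) := by
    rcases findL_zero_or_one s ((t.drop 1).reverse) with h | h <;> rw [h] <;> decide
  rw [findL, if_neg hne, if_neg (by omega : ¬ t.length ≤ s.length)]
  split_ifs with hA hB
  · constructor
    · intro _; exact Or.inl ⟨hA.1, e1.mp hA.2⟩
    · intro _; rfl
  · constructor
    · intro _; exact Or.inr ⟨hB.1, e2.mp hB.2⟩
    · intro _; rfl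
  · constructor
    · intro h; exact absurd h (by decide)
    · rintro (⟨hc, hv⟩ | ⟨hc, hv⟩)
      · exact absurd ⟨hc, e1.mpr hv⟩ hA
      · exact absurd ⟨hc, e2.mpr hv⟩ hB

-- loopB returns 1 exactly when some stack entry is accepted by A's recursion.
lemma loopB_eq (s : List Char) (st : List (List Char)) :
    loopB s st = if ∃ u ∈ st, findL s u = 1 then 1 else 0 := by
  induction st using loopB.induct s with
  | case1 => simp [loopB]
  | case2 rest =>
      rw [loopB]
      have hex : ∃ u ∈ s :: rest, findL s u = 1 := ⟨s, by simp, findL_self s⟩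
      rw [if_pos (rfl : s = s), if_pos hex]
  | case3 u rest hne hlen ih =>
      rw [loopB]
      have h0 : findL s u = 0 := findL_of_short s u (fun h => hne h.symm) hlen
      simp only [if_neg hne, if_pos hlen, ih]
      congr 1
      simp only [List.mem_cons, eq_iff_iff]
      constructor
      · rintro ⟨v, hv, h1⟩; exact ⟨v, Or.inr hv, h1⟩
      · rintro ⟨v, rfl | hv, h1⟩
        · omega
        · exact ⟨v, hv, h1⟩
  | case4 u rest hne hlen st1 st2 ih =>
      rw [loopB, if_neg hne, if_neg hlen]
      show loopB s st2 = _
      rw [ih]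
      congr 1
      have hiff := findL_one_iff s u (fun h => hne h.symm) (by omega)
      by_cases hB : PySem.List.pyGet? u 0 = some 'B' <;>
        by_cases hA : PySem.List.pyGet? u (-1) = some 'A'
      · simp [st2, st1, hA, hB, hiff]; tauto
      · simp [st2, st1, hA, hB, hiff]
      · simp [st2, st1, hA, hB, hiff]
      · simp [st2, st1, hA, hB, hiff]

-- ===== VERDICT (by name: the statement is the Claim_ definition above) =====
theorem find_spec : Claim_equal_find := by
  intro s t _
  unfold Spec_find find find_alt
  rw [loopB_eq]
  rcases findL_zero_or_one s.toList t.toList with h | h <;> simp [h]
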